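-- pv_equiv track=rewrite | github.com/GirayEryilmaz/University-Projects | cmpe493/hw2/test.py | roughTokenGenerator
-- ===== SOURCE A (Python) =====
-- def roughTokenGenerator(text):
--
-- 	chars = []
-- 	for ch in text:
-- 		if not ch.isspace():
-- 			chars.append(ch)
-- 		else:
-- 			if chars: #meaning not empty
-- 				yield(''.join(chars))
--
-- 				chars = []
-- ===== SOURCE B (Python) =====
-- def roughTokenGenerator(text):
--     # One split() call instead of a char-by-char state machine; A never yields
--     # a trailing token that is not followed by whitespace, so drop it.
--     tokens = text.split()
--     if text and not text[-1].isspace():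
--         tokens = tokens[:-1]
--     yield from tokens
-- ===== Notes on version B (the rewrite author's own statement) =====
-- stated objective: idiomatic
-- what changed: Replaces the character-by-character accumulator state machine with one str.split() call followed by dropping the last token when the text does not end in whitespace (A's trailing-token rule).
import Mathlib
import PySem

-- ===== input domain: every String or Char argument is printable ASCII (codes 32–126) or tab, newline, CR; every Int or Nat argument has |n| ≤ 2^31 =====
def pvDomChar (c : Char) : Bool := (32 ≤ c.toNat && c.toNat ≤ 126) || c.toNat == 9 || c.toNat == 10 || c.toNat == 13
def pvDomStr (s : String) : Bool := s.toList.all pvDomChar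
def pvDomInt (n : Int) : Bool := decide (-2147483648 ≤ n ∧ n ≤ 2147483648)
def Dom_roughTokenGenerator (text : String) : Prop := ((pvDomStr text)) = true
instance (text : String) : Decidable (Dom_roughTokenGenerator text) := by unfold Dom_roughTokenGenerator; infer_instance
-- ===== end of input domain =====

-- B replaces A's char-by-char accumulator state machine by one whitespace split
-- followed by dropping the trailing token when the text does not end in whitespace (idiomatic).


-- ===== PORT A =====
-- the for-loop over the characters, state = (chars, yielded tokens)
def roughAux : List Char → List Char → List String → List String
  | [], _, out => out
  | c :: rest, chars, out =>
    if PySem.Chars.isspace c = false then roughAux rest (chars ++ [c]) out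
    else if chars.isEmpty = false then roughAux rest [] (out ++ [String.ofList chars])
    else roughAux rest chars out

def roughTokenGenerator (text : String) : List String := roughAux text.toList [] []

-- ===== PORT B =====
def roughTokenGenerator_alt (text : String) : List String :=
  let tokens := PySem.Str.split₀ text
  match PySem.List.pyGet? text.toList (-1) with      -- text[-1] (none = empty text)
  | none => tokens
  | some c => if PySem.Chars.isspace c then tokens else tokens.dropLast

-- ===== PRECONDITION & SPEC =====
def Spec_roughTokenGenerator (text : String) (out : List String) : Prop := out = roughTokenGenerator_alt text
instance (text : String) (out : List String) : Decidable (Spec_roughTokenGenerator text out) := by unfold Spec_roughTokenGenerator; infer_instance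

-- ===== CLAIM (what is proved, stated in full; the proofs are below) =====
def Claim_equal_roughTokenGenerator : Prop := ∀ (text : String), Dom_roughTokenGenerator text → Spec_roughTokenGenerator text (roughTokenGenerator text)

-- ===== LEMMAS AND PROOFS =====

-- the pending (not yet yielded) buffer left at the end of A's loop, cur stored reversed
def pendBuf : List Char → List Char → List Char
  | [], cur => cur.reverse
  | c :: rest, cur => if PySem.Chars.isspace c then pendBuf rest [] else pendBuf rest (c :: cur)

theorem roughAux_out (cs : List Char) : ∀ chars out,
    roughAux cs chars out = out ++ roughAux cs chars [] := by
  induction cs with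
  | nil => intro chars out; simp [roughAux]
  | cons c rest ih =>
    intro chars out
    simp only [roughAux]
    split_ifs with h1 h2
    · exact ih _ _
    · rw [ih _ (out ++ _), ih _ ([] ++ _)]; simp
    · exact ih _ _

theorem go_acc (cs : List Char) : ∀ cur acc,
    PySem.Chars.split₀.go cs cur acc = acc.reverse ++ PySem.Chars.split₀.go cs cur [] := by
  induction cs with
  | nil => intro cur acc; simp [PySem.Chars.split₀.go]; split_ifs <;> simp
  | cons c rest ih =>
    intro cur acc
    simp only [PySem.Chars.split₀.go]
    split_ifs with h1 h2
    · exact ih _ _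
    · rw [ih [] (cur.reverse :: acc), ih [] [cur.reverse]]; simp
    · exact ih _ _

theorem go_eq_roughAux (cs : List Char) : ∀ cur,
    (PySem.Chars.split₀.go cs cur []).map String.ofList =
      roughAux cs cur.reverse [] ++
        (if (pendBuf cs cur).isEmpty then [] else [String.ofList (pendBuf cs cur)]) := by
  induction cs with
  | nil =>
    intro cur
    simp only [PySem.Chars.split₀.go, roughAux, pendBuf]
    split_ifs with h1 h2 <;> simp_all
  | cons c rest ih =>
    intro cur
    by_cases hs : PySem.Chars.isspace c
    · cases cur with
      | nil => simpa [hs, PySem.Chars.split₀.go, roughAux, pendBuf] using ih []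
      | cons x xs =>
        have h1 : PySem.Chars.split₀.go (c :: rest) (x :: xs) [] =
            [(x :: xs).reverse] ++ PySem.Chars.split₀.go rest [] [] := by
          rw [show PySem.Chars.split₀.go (c :: rest) (x :: xs) [] =
              PySem.Chars.split₀.go rest [] [(x :: xs).reverse] by simp [PySem.Chars.split₀.go, hs]]
          simpa using go_acc rest [] [(x :: xs).reverse]
        have h2 : roughAux (c :: rest) (x :: xs).reverse [] =
            [String.ofList (x :: xs).reverse] ++ roughAux rest [] [] := by
          have hne : (x :: xs).reverse.isEmpty = false := by simp
          rw [show roughAux (c :: rest) (x :: xs).reverse [] =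
              roughAux rest [] ([] ++ [String.ofList (x :: xs).reverse]) by simp [roughAux, hs]]
          simpa using roughAux_out rest [] ([] ++ [String.ofList (x :: xs).reverse])
        have h3 : pendBuf (c :: rest) (x :: xs) = pendBuf rest [] := by simp [pendBuf, hs]
        rw [h1, h2, h3]
        simp only [List.map_append, List.map_cons, List.map_nil, List.append_assoc]
        rw [ih []]
        simp
    · have hs' : PySem.Chars.isspace c = false := by simpa using hs
      have h1 : PySem.Chars.split₀.go (c :: rest) cur [] = PySem.Chars.split₀.go rest (c :: cur) [] := by
        simp [PySem.Chars.split₀.go, hs']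
      have h2 : roughAux (c :: rest) cur.reverse [] = roughAux rest (c :: cur).reverse [] := by
        simp [roughAux, hs']
      have h3 : pendBuf (c :: rest) cur = pendBuf rest (c :: cur) := by simp [pendBuf, hs']
      rw [h1, h2, h3, ih (c :: cur)]

theorem pendBuf_empty_iff (cs : List Char) (h : cs ≠ []) : ∀ cur,
    (pendBuf cs cur).isEmpty = true ↔ PySem.Chars.isspace (cs.getLast h) = true := by
  induction cs with
  | nil => exact absurd rfl h
  | cons c rest ih =>
    intro cur
    have hstep : pendBuf (c :: rest) cur =
        if PySem.Chars.isspace c = true then pendBuf rest [] else pendBuf rest (c :: cur) := rfl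
    cases rest with
    | nil =>
      rw [hstep]
      by_cases hs : PySem.Chars.isspace c <;> simp [hs, pendBuf]
    | cons d ds =>
      have hne : d :: ds ≠ [] := by simp
      rw [hstep, List.getLast_cons hne]
      by_cases hs : PySem.Chars.isspace c
      · simpa [hs] using ih hne []
      · simpa [hs] using ih hne (c :: cur)

-- ===== VERDICT (by name: the statement is the Claim_ definition above) =====
theorem roughTokenGenerator_spec : Claim_equal_roughTokenGenerator := by
  intro text _
  unfold Spec_roughTokenGenerator roughTokenGenerator roughTokenGenerator_alt
  have hsplit : PySem.Str.split₀ text = (PySem.Chars.split₀.go text.toList [] []).map String.ofList := by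
    simp [PySem.Str.split₀, PySem.Chars.split₀]
  rw [hsplit, go_eq_roughAux text.toList []]
  cases hcs : text.toList with
  | nil => simp [PySem.List.pyGet?_neg_one, roughAux, pendBuf]
  | cons c rest =>
    have hne : text.toList ≠ [] := by rw [hcs]; simp
    rw [← hcs]
    rw [PySem.List.pyGet?_neg_one, List.getLast?_eq_some_getLast hne]
    
    by_cases hs : PySem.Chars.isspace (text.toList.getLast hne)
    · have hp : (pendBuf text.toList []).isEmpty = true :=
        (pendBuf_empty_iff text.toList hne []).mpr hs
      simp [hs, hp]
    · have hp : (pendBuf text.toList []).isEmpty = false := by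
        rcases Bool.eq_false_or_eq_true ((pendBuf text.toList []).isEmpty) with h | h
        · exact absurd ((pendBuf_empty_iff text.toList hne []).mp h) hs
        · exact h
      simp [hs, hp]
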